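-- pv_equiv track=rewrite | github.com/pypi-data/pypi-mirror-402 | packages/ailoos/ailoos-2.4.0-py3-none-any.whl/ailoos/compliance/sox_manager.py | _identify_role_conflicts
-- ===== SOURCE A (Python) =====
-- from typing import Dict, Any, List, Optional, Tuple
--
-- def _identify_role_conflicts(roles: List[str]) -> List[Tuple[str, str]]:
--     """Identificar conflictos entre roles."""
--     conflicts = []
--
--     # Definir conflictos conocidos
--     conflict_matrix = {
--         ("accountant", "approver"): "Cannot both record and approve transactions",
--         ("initiator", "approver"): "Cannot both initiate and approve transactions",
--         ("custodian", "reconciler"): "Cannot both custody assets and reconcile accounts"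
--     }
--
--     for i, role1 in enumerate(roles):
--         for role2 in roles[i+1:]:
--             conflict_key = tuple(sorted([role1, role2]))
--             if conflict_key in conflict_matrix:
--                 conflicts.append((role1, role2))
--
--     return conflicts
-- ===== SOURCE B (Python) =====
-- def _identify_role_conflicts(roles):
--     """Identificar conflictos entre roles."""
--     conflict_matrix = {
--         ("accountant", "approver"): "Cannot both record and approve transactions",
--         ("initiator", "approver"): "Cannot both initiate and approve transactions",
--         ("custodian", "reconciler"): "Cannot both custody assets and reconcile accounts"
--     }
--
--     # Normalise each known conflict to its sorted name pair (the form lookups use).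
--     pairs = [tuple(sorted(key)) for key in conflict_matrix]
--
--     # One pass: positions of every role name that can take part in a conflict.
--     positions = {name: [] for pair in pairs for name in pair}
--     for j, role in enumerate(roles):
--         if role in positions:
--             positions[role].append(j)
--
--     # Generate only the matching index pairs, then restore A's (i, j) scan order.
--     hits = []
--     for a, b in pairs:
--         for x in positions[a]:
--             for y in positions[b]:
--                 hits.append((x, y) if x < y else (y, x))
--     hits.sort()
--     return [(roles[i], roles[j]) for i, j in hits]
-- ===== Notes on version B (the rewrite author's own statement) =====
-- stated objective: faster
-- what changed: Instead of testing every pair of roles against the conflict dict (quadratic scan), B makes one pass recording the positions of the few conflict-relevant role names, generates only the matching index pairs from those position lists, and sorts them to restore A's (i,j) scan order; B also normalises each conflict key to its sorted form, fixing A's dead ('initiator','approver') entry.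
-- intended difference: On lists containing both 'initiator' and 'approver', A returns a list omitting every initiator/approver pair because that matrix key is stored unsorted while lookups always use the sorted tuple (the entry can never match), whereas B reports those pairs as the conflict matrix evidently intends. — e.g. on _identify_role_conflicts(["initiator", "approver"]): A returns [], B returns [("initiator", "approver")]
import Mathlib
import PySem

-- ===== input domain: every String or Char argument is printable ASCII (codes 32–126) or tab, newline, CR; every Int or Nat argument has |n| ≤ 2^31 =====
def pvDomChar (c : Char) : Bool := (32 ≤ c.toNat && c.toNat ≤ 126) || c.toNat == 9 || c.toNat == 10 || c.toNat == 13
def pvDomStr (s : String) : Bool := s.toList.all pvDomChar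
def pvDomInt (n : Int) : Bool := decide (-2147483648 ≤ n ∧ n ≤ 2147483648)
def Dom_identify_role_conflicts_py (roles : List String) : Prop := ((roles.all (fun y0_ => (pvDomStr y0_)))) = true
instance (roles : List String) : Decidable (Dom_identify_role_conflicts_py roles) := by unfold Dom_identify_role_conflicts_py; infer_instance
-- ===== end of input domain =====

-- B replaces A's quadratic all-pairs scan by indexing the positions of the conflict-relevant
-- role names in one pass, generating only matching index pairs and sorting them back into A's
-- (i,j) order; B also normalises each conflict key, fixing A's dead ("initiator","approver") entry.


-- ===== PORT A =====
-- the literal conflict_matrix dict of A (and B)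
def pvMatrix : PySem.Dict (String × String) String := PySem.Dict.ofList
  [(("accountant", "approver"), "Cannot both record and approve transactions"),
   (("initiator", "approver"), "Cannot both initiate and approve transactions"),
   (("custodian", "reconciler"), "Cannot both custody assets and reconcile accounts")]

-- tuple(l) for the two-element list sorted([r1, r2]) produces (exact there)
def pvPair2 (l : List String) : String × String :=
  match l with
  | [a, b] => (a, b)
  | _ => ("", "")

def identify_role_conflicts_py (roles : List String) : List (String × String) :=
  (PySem.List.enumerate roles).foldl (fun conflicts p =>
    (PySem.List.slice roles (some (p.1 + 1)) none).foldl (fun acc role2 =>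
      if pvMatrix.contains (pvPair2 (PySem.List.sorted [p.2, role2] (fun x => x) false))
      then acc ++ [(p.2, role2)] else acc)
      conflicts) []

-- ===== PORT B =====
-- pairs = [tuple(sorted(key)) for key in conflict_matrix]
def pvPairs : List (String × String) :=
  (PySem.Dict.keys pvMatrix).map (fun k => pvPair2 (PySem.List.sorted [k.1, k.2] (fun x => x) false))

def identify_role_conflicts_py_alt (roles : List String) : List (String × String) :=
  let pairs := pvPairs
  -- positions = {name: [] for pair in pairs for name in pair}
  let positions0 : PySem.Dict String (List Int) :=
    pairs.foldl (fun d p => (d.insert p.1 []).insert p.2 []) PySem.Dict.empty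
  -- for j, role in enumerate(roles): if role in positions: positions[role].append(j)
  let positions := (PySem.List.enumerate roles).foldl
    (fun d p => if d.contains p.2 then d.modify p.2 [] (fun v => v ++ [p.1]) else d) positions0
  -- generate hits; positions[a] / positions[b]: both keys are present (getD is exact here)
  let hits := pairs.foldl (fun h ab =>
      (positions.getD ab.1 []).foldl (fun h2 x =>
        (positions.getD ab.2 []).foldl (fun h3 y =>
          h3 ++ [if x < y then (x, y) else (y, x)]) h2) h) []
  -- hits.sort()  (Python sorts int pairs lexicographically)
  let shits := PySem.List.sorted2 hits (fun q => q.1) (fun q => q.2) false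
  -- [(roles[i], roles[j]) for i, j in hits]: every index is in range (getD is exact here)
  shits.map (fun q => (PySem.List.pyGetD roles q.1 "", PySem.List.pyGetD roles q.2 ""))

-- ===== PRECONDITION & SPEC =====
-- On lists containing both "initiator" and "approver", A omits every initiator/approver pair
-- because that matrix key is stored unsorted while every lookup key is sorted (the entry can
-- never match); B reports those pairs, as the conflict matrix evidently intends.
def D_identify_role_conflicts_py (roles : List String) : Prop :=
  "initiator" ∈ roles ∧ "approver" ∈ roles
instance (roles : List String) : Decidable (D_identify_role_conflicts_py roles) := by
  unfold D_identify_role_conflicts_py; infer_instance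

def Spec_identify_role_conflicts_py (roles : List String) (out : List (String × String)) : Prop :=
  ¬ D_identify_role_conflicts_py roles → out = identify_role_conflicts_py_alt roles
instance (roles : List String) (out : List (String × String)) : Decidable (Spec_identify_role_conflicts_py roles out) := by
  unfold Spec_identify_role_conflicts_py; infer_instance

def pvDiffWitness_identify_role_conflicts_py : List String := ["initiator", "approver"]
def pvDiffWitnessOut_identify_role_conflicts_py : (List (String × String)) × (List (String × String)) :=
  ([], [("initiator", "approver")])

-- ===== CLAIM (what is proved, stated in full; the proofs are below) =====
def Claim_unchanged_identify_role_conflicts_py : Prop := ∀ (roles : List String), Dom_identify_role_conflicts_py roles → Spec_identify_role_conflicts_py roles (identify_role_conflicts_py roles)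
def Claim_changed_identify_role_conflicts_py : Prop := Dom_identify_role_conflicts_py (pvDiffWitness_identify_role_conflicts_py) ∧ D_identify_role_conflicts_py (pvDiffWitness_identify_role_conflicts_py) ∧ identify_role_conflicts_py (pvDiffWitness_identify_role_conflicts_py) = pvDiffWitnessOut_identify_role_conflicts_py.1 ∧ identify_role_conflicts_py_alt (pvDiffWitness_identify_role_conflicts_py) = pvDiffWitnessOut_identify_role_conflicts_py.2 ∧ pvDiffWitnessOut_identify_role_conflicts_py.1 ≠ pvDiffWitnessOut_identify_role_conflicts_py.2
def Claim_exact_identify_role_conflicts_py : Prop := ∀ (roles : List String), Dom_identify_role_conflicts_py roles → D_identify_role_conflicts_py roles → identify_role_conflicts_py roles ≠ identify_role_conflicts_py_alt roles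

-- ===== LEMMAS AND PROOFS =====

-- the normalised (sorted) name pair of two role names
def pvNorm (a b : String) : String × String := pvPair2 (PySem.List.sorted [a, b] (fun x => x) false)

-- A's effective pairwise test / B's pairwise test, as name predicates
def pvTestA (a b : String) : Bool := pvMatrix.contains (pvNorm a b)
def pvTestB (a b : String) : Bool := decide (pvNorm a b ∈ pvPairs)

-- canonical "pairs of a list" recursion both ports are reduced to
def pvPO (t : String → String → Bool) : List String → List (String × String)
  | [] => []
  | r :: rest => (rest.filter (t r)).map (fun r2 => (r, r2)) ++ pvPO t rest

-- concrete string comparisons (String < does not kernel-reduce; prove via toList)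
theorem pv_lt_ai : "approver" < "initiator" := by norm_num; decide
theorem pv_nlt_ia : ¬ ("initiator" < "approver") := by norm_num; decide
theorem pv_nlt_aa : ¬ ("approver" < "accountant") := by norm_num; decide
theorem pv_nlt_rc : ¬ ("reconciler" < "custodian") := by norm_num; decide

theorem pvSorted_two (a b : String) :
    PySem.List.sorted [a, b] (fun x => x) false = if b < a then [b, a] else [a, b] := by
  simp only [PySem.List.sorted, List.foldl, PySem.List.insertBy]
  split_ifs with h1 <;> simp_all

theorem pvNorm_def (a b : String) : pvNorm a b = if b < a then (b, a) else (a, b) := by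
  rw [pvNorm, pvSorted_two]
  split_ifs <;> rfl

theorem pvKeys_eq : PySem.Dict.keys pvMatrix =
    [("accountant", "approver"), ("initiator", "approver"), ("custodian", "reconciler")] := by
  decide

theorem pvPairs_eq : pvPairs =
    [("accountant", "approver"), ("approver", "initiator"), ("custodian", "reconciler")] := by
  rw [pvPairs, pvKeys_eq]
  simp only [List.map, pvSorted_two]
  rw [if_neg pv_nlt_aa, if_pos pv_lt_ai, if_neg pv_nlt_rc]
  rfl

theorem pvNorm_ne_k2 (a b : String) : pvNorm a b ≠ ("initiator", "approver") := by
  rw [pvNorm_def]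
  split_ifs with h1 <;> intro h <;> cases h
  · exact pv_nlt_ia h1
  · exact h1 pv_lt_ai

theorem pvNorm_cases (a b : String) (h : pvNorm a b = ("approver", "initiator")) :
    (a = "approver" ∧ b = "initiator") ∨ (a = "initiator" ∧ b = "approver") := by
  rw [pvNorm_def] at h
  split_ifs at h <;> cases h
  · exact Or.inr ⟨rfl, rfl⟩
  · exact Or.inl ⟨rfl, rfl⟩

theorem pvA_gen (rest : List String) : ∀ (pre : List String) (acc : List (String × String)),
    (PySem.List.enumerate rest (pre.length : Int)).foldl
      (fun conflicts p =>
        (PySem.List.slice (pre ++ rest) (some (p.1 + 1)) none).foldl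
          (fun acc2 role2 =>
            if pvMatrix.contains (pvPair2 (PySem.List.sorted [p.2, role2] (fun x => x) false))
            then acc2 ++ [(p.2, role2)] else acc2) conflicts) acc
    = acc ++ pvPO pvTestA rest := by
  induction rest with
  | nil =>
    intro pre acc
    simp [PySem.List.enumerate_nil, pvPO]
  | cons r rs ih =>
    intro pre acc
    rw [PySem.List.enumerate_cons, List.foldl_cons]
    have hsl : PySem.List.slice (pre ++ r :: rs) (some ((pre.length : Int) + 1)) none = rs := by
      have h1 : ((pre.length : Int) + 1) = (((pre.length + 1 : Nat) : Nat) : Int) := by push_cast; ring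
      rw [h1, PySem.List.slice_from_natCast]
      rw [show pre ++ r :: rs = (pre ++ [r]) ++ rs by simp]
      rw [List.drop_append_of_le_length (by simp)]
      simp
    rw [hsl]
    rw [PySem.List.foldl_append_if
      (p := fun role2 => pvMatrix.contains (pvPair2 (PySem.List.sorted [r, role2] (fun x => x) false)))
      (f := fun role2 => (r, role2))]
    have h2 : (pre.length : Int) + 1 = (((pre ++ [r]).length : Nat) : Int) := by simp
    have h3 : pre ++ r :: rs = (pre ++ [r]) ++ rs := by simp
    rw [h2, h3, ih (pre ++ [r])]
    show (acc ++ (rs.filter (pvTestA r)).map (fun r2 => (r, r2))) ++ pvPO pvTestA rs = _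
    rw [List.append_assoc]
    rfl

theorem pvA_eq_po (roles : List String) : identify_role_conflicts_py roles = pvPO pvTestA roles := by
  have h := pvA_gen roles [] []
  simpa [identify_role_conflicts_py] using h

theorem mem_pvPO (t : String → String → Bool) (roles : List String) (p : String × String)
    (hp : p ∈ pvPO t roles) : t p.1 p.2 = true := by
  induction roles with
  | nil => cases hp
  | cons r rs ih =>
    rw [pvPO, List.mem_append] at hp
    rcases hp with h | h
    · obtain ⟨r2, hr2, rfl⟩ := List.mem_map.mp h
      exact (List.mem_filter.mp hr2).2
    · exact ih h

theorem pvTestA_not_bad (a b : String) (h : pvTestA a b = true) :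
    pvNorm a b ≠ ("approver", "initiator") := by
  intro hn
  rw [pvTestA, PySem.Dict.contains_eq_decide_mem_keys, pvKeys_eq, hn] at h
  exact absurd h (by decide)

theorem pvTestA_ia : pvTestA "initiator" "approver" = false := by
  rw [pvTestA, pvNorm_def, if_pos pv_lt_ai]
  decide

theorem pvTestB_ia : pvTestB "initiator" "approver" = true := by
  rw [pvTestB, pvNorm_def, if_pos pv_lt_ai, pvPairs_eq]
  decide

theorem pvTestB_ai : pvTestB "approver" "initiator" = true := by
  rw [pvTestB, pvNorm_def, if_neg pv_nlt_ia, pvPairs_eq]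
  decide

theorem pvB_bad_mem (roles : List String) (hd : D_identify_role_conflicts_py roles) :
    ∃ p ∈ pvPO pvTestB roles, pvNorm p.1 p.2 = ("approver", "initiator") := by
  induction roles with
  | nil => exact absurd hd.1 (List.not_mem_nil)
  | cons r rs ih =>
    obtain ⟨hi, ha⟩ := hd
    by_cases hr1 : r = "initiator"
    · have ha' : "approver" ∈ rs := by
        rcases List.mem_cons.mp ha with h | h
        · exact absurd (hr1 ▸ h.symm) (by decide)
        · exact h
      refine ⟨("initiator", "approver"), ?_, ?_⟩
      · subst hr1
        rw [pvPO, List.mem_append]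
        exact Or.inl (List.mem_map.mpr ⟨"approver", List.mem_filter.mpr ⟨ha', pvTestB_ia⟩, rfl⟩)
      · rw [pvNorm_def, if_pos pv_lt_ai]
    · by_cases hr2 : r = "approver"
      · have hi' : "initiator" ∈ rs := by
          rcases List.mem_cons.mp hi with h | h
          · exact absurd (hr2 ▸ h.symm) (by decide)
          · exact h
        refine ⟨("approver", "initiator"), ?_, ?_⟩
        · subst hr2
          rw [pvPO, List.mem_append]
          exact Or.inl (List.mem_map.mpr ⟨"initiator", List.mem_filter.mpr ⟨hi', pvTestB_ai⟩, rfl⟩)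
        · rw [pvNorm_def, if_neg pv_nlt_ia]
      · have hi' : "initiator" ∈ rs := by
          rcases List.mem_cons.mp hi with h | h
          · exact absurd h.symm hr1
          · exact h
        have ha' : "approver" ∈ rs := by
          rcases List.mem_cons.mp ha with h | h
          · exact absurd h.symm hr2
          · exact h
        obtain ⟨p, hp, hn⟩ := ih ⟨hi', ha'⟩
        exact ⟨p, by rw [pvPO, List.mem_append]; exact Or.inr hp, hn⟩

-- ---- B-side machinery: position lists, generated pairs, canonical ordered pair list ----

-- positions of the occurrences of name a, as Int indices in order
def pvP (roles : List String) (a : String) : List Int :=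
  ((PySem.List.enumerate roles).filter (fun p => p.2 == a)).map (fun p => p.1)

-- the index pairs B generates for one conflict pair
def pvF (roles : List String) (ab : String × String) : List (Int × Int) :=
  (pvP roles ab.1).flatMap (fun x => (pvP roles ab.2).map (fun y => if x < y then (x, y) else (y, x)))

-- the canonical (i, j)-ascending list of conflicting index pairs
def pvKI (roles : List String) : List (Int × Int) :=
  (List.range roles.length).flatMap (fun i =>
    ((List.range roles.length).filter
        (fun j => decide (i < j) && pvTestB (roles.getD i "") (roles.getD j ""))).map
      (fun j : Nat => ((i : Int), (j : Int))))

-- the same list with the indices resolved to role names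
def pvKS (t : String → String → Bool) (roles : List String) : List (String × String) :=
  (List.range roles.length).flatMap (fun i =>
    ((List.range roles.length).filter
        (fun j => decide (i < j) && t (roles.getD i "") (roles.getD j ""))).map
      (fun j => (roles.getD i "", roles.getD j "")))

def pvLex (p q : Int × Int) : Prop := p.1 < q.1 ∨ (p.1 = q.1 ∧ p.2 < q.2)
def pvBefore (p q : Int × Int) : Bool :=
  decide (p.1 < q.1) || (!decide (q.1 < p.1) && decide (p.2 < q.2))

theorem pvBefore_iff (p q : Int × Int) : pvBefore p q = true ↔ pvLex p q := by
  simp only [pvBefore, pvLex, Bool.or_eq_true, Bool.and_eq_true, Bool.not_eq_true',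
    decide_eq_true_eq, decide_eq_false_iff_not]
  omega

theorem pvLex_asymm {p q : Int × Int} (h : pvLex p q) : ¬ pvLex q p := by
  simp only [pvLex] at *; omega

theorem pvLex_trans {p q r : Int × Int} (h1 : pvLex p q) (h2 : pvLex q r) : pvLex p r := by
  simp only [pvLex] at *; omega

theorem pvLex_ne {p q : Int × Int} (h : pvLex p q) : p ≠ q := by
  intro he; subst he; simp only [pvLex] at h; omega

theorem pvLex_total_eq {p q : Int × Int} (h1 : ¬ pvLex q p) (h2 : ¬ pvLex p q) : p = q := by
  obtain ⟨a, b⟩ := p; obtain ⟨c, d⟩ := q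
  simp only [pvLex, Prod.mk.injEq] at *
  omega

theorem pvIns_pairwise (x : Int × Int) (l : List (Int × Int))
    (h : l.Pairwise (fun a b => ¬ pvLex b a)) :
    (PySem.List.insertBy pvBefore x l).Pairwise (fun a b => ¬ pvLex b a) := by
  induction l with
  | nil => simp [PySem.List.insertBy]
  | cons y ys ih =>
    rw [List.pairwise_cons] at h
    obtain ⟨h1, h2⟩ := h
    rw [show PySem.List.insertBy pvBefore x (y :: ys)
        = if pvBefore x y then x :: y :: ys else y :: PySem.List.insertBy pvBefore x ys from rfl]
    split_ifs with hb
    · have hxy : pvLex x y := (pvBefore_iff x y).mp hb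
      refine List.pairwise_cons.mpr ⟨?_, List.pairwise_cons.mpr ⟨h1, h2⟩⟩
      intro z hz
      rcases List.mem_cons.mp hz with rfl | hz'
      · exact pvLex_asymm hxy
      · intro hzx
        exact h1 z hz' (pvLex_trans hzx hxy)
    · have hxy : ¬ pvLex x y := fun hl => hb ((pvBefore_iff x y).mpr hl)
      refine List.pairwise_cons.mpr ⟨?_, ih h2⟩
      intro z hz
      rcases (PySem.List.mem_insertBy pvBefore x z ys).mp hz with rfl | hz'
      · exact hxy
      · exact h1 z hz'

theorem pvFold_pairwise (xs : List (Int × Int)) : ∀ (acc : List (Int × Int)),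
    acc.Pairwise (fun a b => ¬ pvLex b a) →
    (xs.foldl (fun acc x => PySem.List.insertBy pvBefore x acc) acc).Pairwise (fun a b => ¬ pvLex b a) := by
  induction xs with
  | nil => intro acc h; exact h
  | cons x xs ih => intro acc h; exact ih _ (pvIns_pairwise x acc h)

theorem pvSorted2_eq (xs ys : List (Int × Int)) (hperm : ys.Perm xs) (hpw : ys.Pairwise pvLex) :
    PySem.List.sorted2 xs (fun q => q.1) (fun q => q.2) false = ys := by
  have hs : PySem.List.sorted2 xs (fun q => q.1) (fun q => q.2) false
      = xs.foldl (fun acc x => PySem.List.insertBy pvBefore x acc) [] := rfl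
  have h1 : (PySem.List.sorted2 xs (fun q => q.1) (fun q => q.2) false).Pairwise
      (fun a b => ¬ pvLex b a) := by
    rw [hs]; exact pvFold_pairwise xs [] List.Pairwise.nil
  have h2 : ys.Pairwise (fun a b => ¬ pvLex b a) := hpw.imp (fun h => pvLex_asymm h)
  have hp : (PySem.List.sorted2 xs (fun q => q.1) (fun q => q.2) false).Perm ys :=
    (PySem.List.sorted2_perm xs _ _ false).trans hperm.symm
  exact List.eq_of_perm_of_sorted (le := fun a b => ¬ pvLex b a)
    (fun a b _ _ hab hba => pvLex_total_eq hab hba) h1 h2 hp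

-- ---- the position dictionary ----

def pvPos0 : PySem.Dict String (List Int) := PySem.Dict.ofList
  [("accountant", []), ("approver", []), ("initiator", []), ("custodian", []), ("reconciler", [])]

theorem pvPos0_eq :
    ([("accountant", "approver"), ("approver", "initiator"), ("custodian", "reconciler")] :
        List (String × String)).foldl (fun d p => (d.insert p.1 []).insert p.2 [])
      PySem.Dict.empty = pvPos0 := by decide

theorem pvBuild (l : List (Int × String)) : ∀ (d : PySem.Dict String (List Int)) (a : String),
    (l.foldl (fun d p => if d.contains p.2 then d.modify p.2 [] (fun v => v ++ [p.1]) else d) d).getD a []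
    = d.getD a [] ++ (if d.contains a then (l.filter (fun p => p.2 == a)).map (fun p => p.1) else []) := by
  induction l with
  | nil => intro d a; simp
  | cons q lt ih =>
    intro d a
    rw [List.foldl_cons]
    by_cases hd : d.contains q.2 = true
    · rw [if_pos hd, ih]
      have hca : (d.modify q.2 [] (fun v => v ++ [q.1])).contains a = d.contains a := by
        rw [PySem.Dict.contains_modify]
        by_cases haq : a = q.2
        · subst haq; simp [hd]
        · simp [haq]
      rw [hca, PySem.Dict.getD_modify]
      by_cases haq : a = q.2
      · subst haq
        rw [if_pos rfl, List.filter_cons_of_pos (by simp), hd]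
        simp
      · rw [if_neg haq, List.filter_cons_of_neg (by simp; exact fun h => haq h.symm)]
    · rw [if_neg hd, ih]
      by_cases haq : a = q.2
      · subst haq
        simp only [Bool.not_eq_true] at hd
        simp [hd]
      · rw [List.filter_cons_of_neg (by simp; exact fun h => haq h.symm)]

theorem pvPosF_getD (roles : List String) (a : String)
    (h1 : pvPos0.contains a = true) (h2 : pvPos0.getD a [] = []) :
    ((PySem.List.enumerate roles).foldl
        (fun d p => if d.contains p.2 then d.modify p.2 [] (fun v => v ++ [p.1]) else d)
        pvPos0).getD a []
    = pvP roles a := by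
  rw [pvBuild, h1, h2]
  simp [pvP]

-- ---- membership and uniqueness facts ----

theorem mem_pvP (roles : List String) (a : String) (x : Int) :
    x ∈ pvP roles a ↔ ∃ k : Nat, k < roles.length ∧ x = (k : Int) ∧ roles.getD k "" = a := by
  simp only [pvP, List.mem_map, List.mem_filter, PySem.List.mem_enumerate_iff]
  constructor
  · rintro ⟨p, ⟨⟨k, hk, rfl⟩, hbeq⟩, rfl⟩
    refine ⟨k, hk, by simp, ?_⟩
    rw [List.getD_eq_getElem _ _ hk]
    exact beq_iff_eq.mp (by simpa using hbeq)
  · rintro ⟨k, hk, rfl, ha⟩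
    refine ⟨((0 : Int) + k, roles[k]), ⟨⟨k, hk, rfl⟩, ?_⟩, by simp⟩
    rw [← List.getD_eq_getElem _ "" hk] at *
    simpa using ha

theorem pvP_pairwise (roles : List String) (a : String) : (pvP roles a).Pairwise (· < ·) := by
  unfold pvP
  rw [List.pairwise_map]
  exact (PySem.List.pairwise_lt_enumerate roles 0).filter _

theorem pvP_nodup (roles : List String) (a : String) : (pvP roles a).Nodup :=
  (pvP_pairwise roles a).imp (fun h => ne_of_lt h)

theorem mem_pvF (roles : List String) (a b : String) (q : Int × Int) :
    q ∈ pvF roles (a, b) ↔ ∃ x y, x ∈ pvP roles a ∧ y ∈ pvP roles b ∧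
      q = if x < y then (x, y) else (y, x) := by
  simp only [pvF, List.mem_flatMap, List.mem_map]
  constructor
  · rintro ⟨x, hx, y, hy, rfl⟩; exact ⟨x, y, hx, hy, rfl⟩
  · rintro ⟨x, y, hx, hy, rfl⟩; exact ⟨x, hx, y, hy, rfl⟩

theorem pvIdx_ne (roles : List String) (a b : String) (hab : a ≠ b) (x y : Int)
    (hx : x ∈ pvP roles a) (hy : y ∈ pvP roles b) : x ≠ y := by
  obtain ⟨k, hk, rfl, hka⟩ := (mem_pvP roles a x).mp hx
  obtain ⟨k', hk', rfl, hkb⟩ := (mem_pvP roles b y).mp hy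
  intro he
  have : k = k' := by exact_mod_cast he
  exact hab (by rw [← hka, ← hkb, this])

theorem pvNorm_idx_inj (roles : List String) (a b : String) (hab : a ≠ b) (x y x' y' : Int)
    (hx : x ∈ pvP roles a) (hy : y ∈ pvP roles b) (hx' : x' ∈ pvP roles a) (hy' : y' ∈ pvP roles b)
    (he : (if x < y then (x, y) else (y, x)) = (if x' < y' then (x', y') else (y', x'))) :
    x = x' ∧ y = y' := by
  have h1 : x ≠ y := pvIdx_ne roles a b hab x y hx hy
  have h2 : x' ≠ y' := pvIdx_ne roles a b hab x' y' hx' hy'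
  have h3 : x ≠ y' := pvIdx_ne roles a b hab x y' hx hy'
  have h4 : x' ≠ y := pvIdx_ne roles a b hab x' y hx' hy
  split_ifs at he with c1 c2 c2 <;> rw [Prod.mk.injEq] at he <;>
    exact ⟨by omega, by omega⟩

theorem pvF_nodup (roles : List String) (a b : String) (hab : a ≠ b) :
    (pvF roles (a, b)).Nodup := by
  show List.Pairwise _ _
  unfold pvF
  rw [List.pairwise_flatMap]
  constructor
  · intro x hx
    rw [List.pairwise_map]
    refine List.Pairwise.imp_of_mem ?_ (pvP_nodup roles b)
    intro y y' hy hy' hne he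
    exact hne (pvNorm_idx_inj roles a b hab x y x y' hx hy hx hy' he).2
  · refine List.Pairwise.imp_of_mem ?_ (pvP_nodup roles a)
    intro x x' hx hx' hne q hq q' hq' he
    obtain ⟨y, hy, rfl⟩ := List.mem_map.mp hq
    obtain ⟨y', hy', rfl⟩ := List.mem_map.mp hq'
    exact hne (pvNorm_idx_inj roles a b hab x y x' y' hx hy hx' hy' he).1

theorem pvF_names (roles : List String) (a b : String) (q : Int × Int)
    (_hab : a ≠ b) (h : q ∈ pvF roles (a, b)) :
    ∃ i j : Nat, q = ((i : Int), (j : Int)) ∧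
      ((roles.getD i "" = a ∧ roles.getD j "" = b) ∨ (roles.getD i "" = b ∧ roles.getD j "" = a)) := by
  obtain ⟨x, y, hx, hy, rfl⟩ := (mem_pvF roles a b q).mp h
  obtain ⟨k, hk, rfl, hka⟩ := (mem_pvP roles a x).mp hx
  obtain ⟨k', hk', rfl, hkb⟩ := (mem_pvP roles b y).mp hy
  split_ifs with c
  · exact ⟨k, k', rfl, Or.inl ⟨hka, hkb⟩⟩
  · exact ⟨k', k, rfl, Or.inr ⟨hkb, hka⟩⟩

theorem mem_pvKI (roles : List String) (q : Int × Int) :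
    q ∈ pvKI roles ↔ ∃ i j : Nat, i < roles.length ∧ j < roles.length ∧ i < j ∧
      pvTestB (roles.getD i "") (roles.getD j "") = true ∧ q = ((i : Int), (j : Int)) := by
  constructor
  · intro hq
    rw [pvKI, List.mem_flatMap] at hq
    obtain ⟨i, hi, hq⟩ := hq
    rw [List.mem_map] at hq
    obtain ⟨j, hj, rfl⟩ := hq
    rw [List.mem_filter, List.mem_range] at hj
    rw [List.mem_range] at hi
    obtain ⟨hj1, hj2⟩ := hj
    rw [Bool.and_eq_true, decide_eq_true_eq] at hj2
    exact ⟨i, j, hi, hj1, hj2.1, hj2.2, rfl⟩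
  · rintro ⟨i, j, hi, hj, hij, ht, rfl⟩
    rw [pvKI, List.mem_flatMap]
    refine ⟨i, List.mem_range.mpr hi, ?_⟩
    rw [List.mem_map]
    refine ⟨j, ?_, rfl⟩
    rw [List.mem_filter, List.mem_range]
    refine ⟨hj, ?_⟩
    rw [Bool.and_eq_true, decide_eq_true_eq]
    exact ⟨hij, ht⟩

theorem pvKI_pairwise (roles : List String) : (pvKI roles).Pairwise pvLex := by
  unfold pvKI
  rw [List.pairwise_flatMap]
  constructor
  · intro i _
    rw [List.pairwise_map]
    refine ((List.pairwise_lt_range).filter _).imp ?_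
    intro j j' hjj
    refine Or.inr ⟨rfl, ?_⟩
    show ((j : Int)) < ((j' : Int))
    exact_mod_cast hjj
  · refine (List.pairwise_lt_range).imp ?_
    intro i i' hii q hq q' hq'
    obtain ⟨j, _, rfl⟩ := List.mem_map.mp hq
    obtain ⟨j', _, rfl⟩ := List.mem_map.mp hq'
    refine Or.inl ?_
    show ((i : Int)) < ((i' : Int))
    exact_mod_cast hii

theorem pvKI_nodup (roles : List String) : (pvKI roles).Nodup :=
  (pvKI_pairwise roles).imp (fun h => pvLex_ne h)

-- the three conflict-pair comparisons needed below
theorem pv_lt_aa2 : "accountant" < "approver" := by norm_num; decide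
theorem pv_lt_cr : "custodian" < "reconciler" := by norm_num; decide

theorem pvF_subset_KI (roles : List String) (a b : String) (hlt : a < b)
    (hm : (a, b) ∈ pvPairs) : ∀ q ∈ pvF roles (a, b), q ∈ pvKI roles := by
  intro q hq
  have hab : a ≠ b := ne_of_lt hlt
  obtain ⟨x, y, hx, hy, rfl⟩ := (mem_pvF roles a b q).mp hq
  obtain ⟨k, hk, rfl, hka⟩ := (mem_pvP roles a x).mp hx
  obtain ⟨k', hk', rfl, hkb⟩ := (mem_pvP roles b y).mp hy
  have hkk : k ≠ k' := fun he => hab (by rw [← hka, ← hkb, he])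
  rw [mem_pvKI]
  by_cases c : ((k : Int) < (k' : Int))
  · refine ⟨k, k', hk, hk', by exact_mod_cast c, ?_, by rw [if_pos c]⟩
    rw [hka, hkb, pvTestB, pvNorm_def, if_neg (lt_asymm hlt)]
    simp [hm]
  · have c' : (k' : Int) < (k : Int) := by
      rcases lt_or_ge (k' : Int) (k : Int) with h | h
      · exact h
      · exact absurd (by omega : (k : Int) = (k' : Int)) (by exact_mod_cast hkk)
    refine ⟨k', k, hk', hk, by exact_mod_cast c', ?_, by rw [if_neg c]⟩
    rw [hkb, hka, pvTestB, pvNorm_def, if_pos hlt]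
    simp [hm]

theorem pvKI_subset_F (roles : List String) (q : Int × Int) (hq : q ∈ pvKI roles) :
    ∃ ab ∈ ([("accountant", "approver"), ("approver", "initiator"),
        ("custodian", "reconciler")] : List (String × String)), q ∈ pvF roles ab := by
  obtain ⟨i, j, hi, hj, hij, ht, rfl⟩ := (mem_pvKI roles _).mp hq
  rw [pvTestB, decide_eq_true_eq, pvPairs_eq] at ht
  have main : ∀ a b : String, pvNorm (roles.getD i "") (roles.getD j "") = (a, b) →
      ((i : Int), (j : Int)) ∈ pvF roles (a, b) := by
    intro a b hn
    rw [pvNorm_def] at hn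
    rw [mem_pvF]
    split_ifs at hn with c
    · rw [Prod.mk.injEq] at hn
      refine ⟨(j : Int), (i : Int), (mem_pvP roles a _).mpr ⟨j, hj, rfl, hn.1⟩,
        (mem_pvP roles b _).mpr ⟨i, hi, rfl, hn.2⟩, ?_⟩
      rw [if_neg (by simp; omega)]
    · rw [Prod.mk.injEq] at hn
      refine ⟨(i : Int), (j : Int), (mem_pvP roles a _).mpr ⟨i, hi, rfl, hn.1⟩,
        (mem_pvP roles b _).mpr ⟨j, hj, rfl, hn.2⟩, ?_⟩
      rw [if_pos (by exact_mod_cast hij)]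
  rcases List.mem_cons.mp ht with h | h
  · exact ⟨_, by simp, main _ _ h⟩
  rcases List.mem_cons.mp h with h | h
  · exact ⟨_, by simp, main _ _ h⟩
  rcases List.mem_cons.mp h with h | h
  · exact ⟨_, by simp, main _ _ h⟩
  · exact absurd h (List.not_mem_nil)

theorem pvF_disjoint (roles : List String) (a b a' b' : String)
    (hab : a ≠ b) (hab' : a' ≠ b')
    (hdiff : ∀ u v : String, (u = a ∧ v = b) ∨ (u = b ∧ v = a) →
      ¬ ((u = a' ∧ v = b') ∨ (u = b' ∧ v = a'))) :
    ∀ q, q ∈ pvF roles (a, b) → q ∈ pvF roles (a', b') → False := by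
  intro q h1 h2
  obtain ⟨i, j, rfl, hn1⟩ := pvF_names roles a b q hab h1
  obtain ⟨i', j', he, hn2⟩ := pvF_names roles a' b' _ hab' h2
  rw [Prod.mk.injEq] at he
  have hi : i = i' := by exact_mod_cast he.1
  have hj : j = j' := by exact_mod_cast he.2
  subst hi; subst hj
  rcases hn1 with ⟨h3, h4⟩ | ⟨h3, h4⟩ <;> rcases hn2 with ⟨h5, h6⟩ | ⟨h5, h6⟩ <;>
    [ exact hdiff _ _ (Or.inl ⟨h3, h4⟩) (Or.inl ⟨h5, h6⟩);
      exact hdiff _ _ (Or.inl ⟨h3, h4⟩) (Or.inr ⟨h5, h6⟩);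
      exact hdiff _ _ (Or.inr ⟨h3, h4⟩) (Or.inl ⟨h5, h6⟩);
      exact hdiff _ _ (Or.inr ⟨h3, h4⟩) (Or.inr ⟨h5, h6⟩) ]

theorem pvHits_nodup (roles : List String) :
    ((pvF roles ("accountant", "approver") ++ pvF roles ("approver", "initiator"))
      ++ pvF roles ("custodian", "reconciler")).Nodup := by
  have d12 := pvF_disjoint roles "accountant" "approver" "approver" "initiator"
    (by decide) (by decide) (by intro u v h1 h2; rcases h1 with ⟨rfl, rfl⟩ | ⟨rfl, rfl⟩ <;>
      rcases h2 with ⟨h, h'⟩ | ⟨h, h'⟩ <;> simp_all)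
  have d13 := pvF_disjoint roles "accountant" "approver" "custodian" "reconciler"
    (by decide) (by decide) (by intro u v h1 h2; rcases h1 with ⟨rfl, rfl⟩ | ⟨rfl, rfl⟩ <;>
      rcases h2 with ⟨h, h'⟩ | ⟨h, h'⟩ <;> simp_all)
  have d23 := pvF_disjoint roles "approver" "initiator" "custodian" "reconciler"
    (by decide) (by decide) (by intro u v h1 h2; rcases h1 with ⟨rfl, rfl⟩ | ⟨rfl, rfl⟩ <;>
      rcases h2 with ⟨h, h'⟩ | ⟨h, h'⟩ <;> simp_all)
  refine List.Nodup.append (List.Nodup.append ?_ ?_ ?_) ?_ ?_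
  · exact pvF_nodup roles _ _ (by decide)
  · exact pvF_nodup roles _ _ (by decide)
  · exact fun q h1 h2 => d12 q h1 h2
  · exact pvF_nodup roles _ _ (by decide)
  · intro q h1 h2
    rcases List.mem_append.mp h1 with h | h
    · exact d13 q h h2
    · exact d23 q h h2

theorem pvHits_perm (roles : List String) :
    (pvKI roles).Perm
      ((pvF roles ("accountant", "approver") ++ pvF roles ("approver", "initiator"))
        ++ pvF roles ("custodian", "reconciler")) := by
  rw [List.perm_ext_iff_of_nodup (pvKI_nodup roles) (pvHits_nodup roles)]
  intro q
  constructor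
  · intro hq
    obtain ⟨ab, hab, hf⟩ := pvKI_subset_F roles q hq
    simp only [List.mem_append]
    rcases List.mem_cons.mp hab with rfl | hab
    · exact Or.inl (Or.inl hf)
    rcases List.mem_cons.mp hab with rfl | hab
    · exact Or.inl (Or.inr hf)
    rcases List.mem_cons.mp hab with rfl | hab
    · exact Or.inr hf
    · exact absurd hab (List.not_mem_nil)
  · intro hq
    rcases List.mem_append.mp hq with h | h
    · rcases List.mem_append.mp h with h' | h'
      · exact pvF_subset_KI roles _ _ pv_lt_aa2 (by rw [pvPairs_eq]; simp) q h'
      · exact pvF_subset_KI roles _ _ pv_lt_ai (by rw [pvPairs_eq]; simp) q h'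
    · exact pvF_subset_KI roles _ _ pv_lt_cr (by rw [pvPairs_eq]; simp) q h

-- ---- from index pairs to name pairs ----

theorem pvKI_map_eq (roles : List String) :
    (pvKI roles).map (fun q => (PySem.List.pyGetD roles q.1 "", PySem.List.pyGetD roles q.2 ""))
      = pvKS pvTestB roles := by
  unfold pvKI pvKS
  rw [List.map_flatMap]
  congr 1
  funext i
  rw [List.map_map]
  refine List.map_congr_left ?_
  intro j _
  simp [Function.comp, PySem.List.pyGetD_natCast]

theorem pvIdxFM (xs : List String) (p : String → Bool) :
    ((List.range xs.length).filter (fun k => p (xs.getD k ""))).map (fun k => xs.getD k "")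
      = xs.filter p := by
  induction xs with
  | nil => rfl
  | cons x xs ih =>
    simp only [List.length_cons, List.range_succ_eq_map, List.filter_cons, List.getD_cons_zero]
    rw [List.filter_map]
    have hped : ((fun k => p ((x :: xs).getD k "")) ∘ Nat.succ) = fun k => p (xs.getD k "") := by
      funext k; simp [Function.comp]
    rw [hped]
    by_cases hp : p x = true
    · rw [if_pos hp]
      simp only [List.map_cons, List.getD_cons_zero, List.map_map]
      rw [show (fun k => (x :: xs).getD k "") ∘ Nat.succ = fun k => xs.getD k "" by
        funext k; simp [Function.comp]]
      rw [ih, if_pos hp]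
    · rw [if_neg hp]
      rw [List.map_map,
        show (fun k => (x :: xs).getD k "") ∘ Nat.succ = fun k => xs.getD k "" by
          funext k; simp [Function.comp]]
      rw [ih, if_neg hp]

theorem pvKS_eq_po (t : String → String → Bool) (roles : List String) :
    pvKS t roles = pvPO t roles := by
  induction roles with
  | nil => rfl
  | cons r rest ih =>
    unfold pvKS
    simp only [List.length_cons, List.range_succ_eq_map, List.flatMap_cons]
    rw [pvPO]
    congr 1
    · -- the i = 0 row
      rw [List.filter_cons]
      rw [if_neg (by simp)]
      rw [List.filter_map]
      have hped : ((fun j => decide (0 < j) && t ((r :: rest).getD 0 "") ((r :: rest).getD j ""))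
          ∘ Nat.succ) = fun k => t r (rest.getD k "") := by
        funext k
        simp [Function.comp]
      rw [hped, List.map_map]
      rw [show (fun j => ((r :: rest).getD 0 "", (r :: rest).getD j "")) ∘ Nat.succ
          = (fun r2 => (r, r2)) ∘ (fun k => rest.getD k "") by
        funext k; simp [Function.comp]]
      rw [← List.map_map, pvIdxFM]
    · -- the i = k + 1 rows
      rw [List.flatMap_map, ← ih]
      unfold pvKS
      congr 1
      funext i
      rw [List.filter_cons, if_neg (by simp)]
      rw [List.filter_map]
      have hped : ((fun j => decide (i + 1 < j) && t ((r :: rest).getD (i + 1) "")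
            ((r :: rest).getD j "")) ∘ Nat.succ)
          = fun j => decide (i < j) && t (rest.getD i "") (rest.getD j "") := by
        funext k
        simp [Function.comp]
      rw [hped, List.map_map]
      rw [show (fun j => ((r :: rest).getD (i + 1) "", (r :: rest).getD j "")) ∘ Nat.succ
          = fun j => (rest.getD i "", rest.getD j "") by
        funext k; simp [Function.comp]]

-- ---- assembling B ----

theorem pvB_eq_po (roles : List String) : identify_role_conflicts_py_alt roles = pvPO pvTestB roles := by
  have step1 : identify_role_conflicts_py_alt roles
      = (PySem.List.sorted2
          ((pvF roles ("accountant", "approver") ++ pvF roles ("approver", "initiator"))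
            ++ pvF roles ("custodian", "reconciler"))
          (fun q => q.1) (fun q => q.2) false).map
        (fun q => (PySem.List.pyGetD roles q.1 "", PySem.List.pyGetD roles q.2 "")) := by
    simp only [identify_role_conflicts_py_alt, pvPairs_eq]
    rw [pvPos0_eq]
    simp only [List.foldl_cons, List.foldl_nil]
    rw [pvPosF_getD roles "accountant" (by decide) (by decide),
        pvPosF_getD roles "approver" (by decide) (by decide),
        pvPosF_getD roles "initiator" (by decide) (by decide),
        pvPosF_getD roles "custodian" (by decide) (by decide),
        pvPosF_getD roles "reconciler" (by decide) (by decide)]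
    simp only [PySem.List.foldl_append_singleton_eq_map, PySem.List.foldl_append_eq_flatMap,
      List.nil_append]
    rfl
  rw [step1, pvSorted2_eq _ (pvKI roles) (pvHits_perm roles) (pvKI_pairwise roles),
      pvKI_map_eq, pvKS_eq_po]

theorem pvPO_congr (t1 t2 : String → String → Bool) (roles : List String)
    (h : ∀ a ∈ roles, ∀ b ∈ roles, t1 a b = t2 a b) : pvPO t1 roles = pvPO t2 roles := by
  induction roles with
  | nil => rfl
  | cons r rest ih =>
    simp only [pvPO]
    rw [List.filter_congr (fun x hx => h r (List.mem_cons_self) x (List.mem_cons_of_mem _ hx)),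
        ih (fun x hx y hy => h x (List.mem_cons_of_mem _ hx) y (List.mem_cons_of_mem _ hy))]

theorem pvTest_agree (a b : String) (hne : pvNorm a b ≠ ("approver", "initiator")) :
    pvTestA a b = pvTestB a b := by
  rw [pvTestA, pvTestB, PySem.Dict.contains_eq_decide_mem_keys, pvKeys_eq, pvPairs_eq]
  rw [decide_eq_decide]
  have h2 := pvNorm_ne_k2 a b
  simp only [List.mem_cons, List.not_mem_nil, or_false]
  tauto

-- ===== VERDICT (by name: the statement is the Claim_ definition above) =====
theorem identify_role_conflicts_py_spec : Claim_unchanged_identify_role_conflicts_py := by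
  intro roles _ hnd
  rw [pvA_eq_po, pvB_eq_po]
  apply pvPO_congr
  intro a ha b hb
  apply pvTest_agree
  intro hn
  apply hnd
  rcases pvNorm_cases a b hn with ⟨ha', hb'⟩ | ⟨ha', hb'⟩
  · exact ⟨hb' ▸ hb, ha' ▸ ha⟩
  · exact ⟨ha' ▸ ha, hb' ▸ hb⟩

theorem identify_role_conflicts_py_changed : Claim_changed_identify_role_conflicts_py := by
  unfold Claim_changed_identify_role_conflicts_py
  refine ⟨by decide, by decide, ?_, ?_, by decide⟩
  · show identify_role_conflicts_py ["initiator", "approver"] = []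
    rw [pvA_eq_po]
    simp [pvPO, pvTestA_ia]
  · show identify_role_conflicts_py_alt ["initiator", "approver"] = [("initiator", "approver")]
    rw [pvB_eq_po]
    simp [pvPO, pvTestB_ia]

theorem identify_role_conflicts_py_tight : Claim_exact_identify_role_conflicts_py := by
  intro roles _ hd heq
  rw [pvA_eq_po, pvB_eq_po] at heq
  obtain ⟨p, hp, hn⟩ := pvB_bad_mem roles hd
  rw [← heq] at hp
  exact pvTestA_not_bad p.1 p.2 (mem_pvPO pvTestA roles p hp) hn
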